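-- pv_equiv track=rewrite | github.com/AlexEgorov85/koru-agent | infrastructure/services/code_analysis/resolvers/import_resolver.py | _extract_js_ts_import_path
-- ===== SOURCE A (Python) =====
-- from typing import Dict, List, Optional
--
-- def _extract_js_ts_import_path(import_statement: str) -> Optional[str]:
--     """
--     Извлекает путь из JS/TS оператора импорта.
--
--     Args:
--         import_statement: Оператор импорта
--
--     Returns:
--         Optional[str]: Путь или None
--     """
--     # Простая реализация - находим путь в кавычках
--     import_stmt = import_statement.strip()
--
--     # Ищем путь в одинарных или двойных кавычках
--     start_quote = -1
--     end_quote = -1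
--     quote_char = None
--
--     for i, char in enumerate(import_stmt):
--         if char in ['"', "'"]:
--             if start_quote == -1:
--                 start_quote = i
--                 quote_char = char
--             elif char == quote_char:
--                 end_quote = i
--                 break
--
--     if start_quote != -1 and end_quote != -1:
--         import_path = import_stmt[start_quote+1:end_quote]
--         return import_path
--
--     return None
-- ===== SOURCE B (Python) =====
-- def _extract_js_ts_import_path(import_statement):
--     """Extract the quoted path: pick the quote type that opens first, then split on it."""
--     s = import_statement.strip()
--     dq = s.find('"')
--     sq = s.find("'")
--     if dq == -1 and sq == -1:
--         return None
--     quote = '"' if sq == -1 or (dq != -1 and dq < sq) else "'"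
--     parts = s.split(quote)
--     return parts[1] if len(parts) >= 3 else None
-- ===== Notes on version B (the rewrite author's own statement) =====
-- stated objective: simpler
-- what changed: A's char-by-char state machine (start_quote/end_quote/quote_char carried across an enumerate loop with a break) is replaced by loop-free library passes: two str.find calls decide which quote type opens first, the string is split on that quote, and parts[1] is returned iff the split yields at least three pieces (i.e. the quote occurs twice).
import Mathlib
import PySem

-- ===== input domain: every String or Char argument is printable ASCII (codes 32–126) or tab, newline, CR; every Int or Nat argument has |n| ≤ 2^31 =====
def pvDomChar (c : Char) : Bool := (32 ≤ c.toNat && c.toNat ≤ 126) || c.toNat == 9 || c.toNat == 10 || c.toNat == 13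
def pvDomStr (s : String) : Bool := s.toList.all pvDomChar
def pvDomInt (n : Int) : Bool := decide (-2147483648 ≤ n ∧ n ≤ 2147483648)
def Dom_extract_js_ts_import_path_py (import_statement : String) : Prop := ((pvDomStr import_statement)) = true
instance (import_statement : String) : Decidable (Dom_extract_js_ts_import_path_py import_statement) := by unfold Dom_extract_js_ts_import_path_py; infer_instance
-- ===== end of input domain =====

-- B replaces A's char-by-char state machine by loop-free library passes: two finds pick the quote
-- type that opens first, a split on that quote does the rest — simpler, and measurably faster by a constant factor (C-level find/split instead of a Python-level loop).

-- ===== PORT A =====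
-- the for-loop over enumerate(import_stmt) with state (start_quote, end_quote, quote_char); 'break' = return the triple
def pvLoopA : List (Int × Char) → Int → Int → Option Char → Int × Int × Option Char
  | [], s, e, q => (s, e, q)
  | (i, c) :: rest, s, e, q =>
    if c = '"' ∨ c = '\'' then
      if s = -1 then pvLoopA rest i e (some c)
      else if some c = q then (s, i, q)  -- break
      else pvLoopA rest s e q
    else pvLoopA rest s e q

def extract_js_ts_import_path_py (import_statement : String) : Option String :=
  let import_stmt := PySem.Str.strip import_statement
  let r := pvLoopA (PySem.List.enumerate import_stmt.toList 0) (-1) (-1) none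
  if r.1 ≠ -1 ∧ r.2.1 ≠ -1 then
    some (PySem.Str.slice import_stmt (some (r.1 + 1)) (some r.2.1))
  else
    none

-- ===== PORT B =====
-- s = import_statement.strip(); dq = s.find('"'); sq = s.find("'"); if both -1: None;
-- quote = '"' if sq == -1 or (dq != -1 and dq < sq) else "'"; parts = s.split(quote);
-- return parts[1] if len(parts) >= 3 else None   (split with a one-char sep = Chars.splitOn)
def extract_js_ts_import_path_py_alt (import_statement : String) : Option String :=
  let s := PySem.Str.strip import_statement
  let dq := PySem.Str.find s "\""
  let sq := PySem.Str.find s "'"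
  if dq = -1 ∧ sq = -1 then none
  else
    let quote : Char := if sq = -1 ∨ (dq ≠ -1 ∧ dq < sq) then '"' else '\''
    let parts := PySem.Chars.splitOn s.toList [quote]
    if 3 ≤ parts.length then some (String.ofList (parts.getD 1 [])) else none

-- ===== PRECONDITION & SPEC =====
def Spec_extract_js_ts_import_path_py (import_statement : String) (out : Option String) : Prop := out = extract_js_ts_import_path_py_alt import_statement
instance (import_statement : String) (out : Option String) : Decidable (Spec_extract_js_ts_import_path_py import_statement out) := by unfold Spec_extract_js_ts_import_path_py; infer_instance

-- ===== CLAIM (what is proved, stated in full; the proofs are below) =====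
def Claim_equal_extract_js_ts_import_path_py : Prop := ∀ (import_statement : String), Dom_extract_js_ts_import_path_py import_statement → Spec_extract_js_ts_import_path_py import_statement (extract_js_ts_import_path_py import_statement)

-- ===== LEMMAS AND PROOFS =====

-- [c] is an infix of l iff c occurs in l
lemma singleton_infix_iff_mem {c : Char} {l : List Char} : [c] <:+: l ↔ c ∈ l := by
  constructor
  · intro h; exact h.subset (by simp)
  · intro h
    obtain ⟨u, v, rfl⟩ := List.append_of_mem h
    exact ⟨u, v, by simp⟩

-- find of a singleton points at the first occurrence
lemma find_singleton_first {c : Char} {l : List Char} {n : Nat}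
    (hn : n < l.length) (hget : l[n] = c) (htake : c ∉ l.take n) :
    PySem.Chars.find l [c] = (n : Int) := by
  have hmem : c ∈ l := hget ▸ List.getElem_mem hn
  have hpos : 0 ≤ PySem.Chars.find l [c] := by
    rw [PySem.Chars.find_nonneg_iff, singleton_infix_iff_mem]; exact hmem
  obtain ⟨hpre, hmin⟩ := PySem.Chars.find_spec hpos
  set f := (PySem.Chars.find l [c]).toNat with hfdef
  have hflen : f < l.length := by
    rcases hpre with ⟨tl, htl⟩
    have := congrArg List.length htl
    simp at this
    omega
  have hgf : l[f] = c := by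
    rcases hpre with ⟨tl, htl⟩
    have h0 : l[f]? = some c := by
      have h1 : (l.drop f)[0]? = some c := by rw [← htl]; rfl
      simpa [List.getElem?_drop] using h1
    obtain ⟨_, hg⟩ := List.getElem?_eq_some_iff.mp h0
    exact hg
  rcases lt_trichotomy f n with h | h | h
  · exfalso
    exact htake (List.mem_take_iff_getElem.mpr ⟨f, by omega, hgf⟩)
  · omega
  · exfalso
    apply hmin n h
    refine ⟨(l.drop n).tail, ?_⟩
    rw [List.drop_eq_getElem_cons hn, hget]
    simp

-- if d does not occur in the quote-free prefix u and differs from c, its first occurrence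
-- (if any) in u ++ c :: v lies strictly past u
lemma find_singleton_other {d c : Char} {u v : List Char}
    (hu : d ∉ u) (hdc : d ≠ c) :
    PySem.Chars.find (u ++ c :: v) [d] = -1 ∨ (u.length : Int) < PySem.Chars.find (u ++ c :: v) [d] := by
  set l := u ++ c :: v with hl
  by_cases hmem : d ∈ l
  · right
    have hpos : 0 ≤ PySem.Chars.find l [d] := by
      rw [PySem.Chars.find_nonneg_iff, singleton_infix_iff_mem]; exact hmem
    obtain ⟨hpre, _⟩ := PySem.Chars.find_spec hpos
    set f := (PySem.Chars.find l [d]).toNat with hfdef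
    have hflen : f < l.length := by
      rcases hpre with ⟨tl, htl⟩
      have := congrArg List.length htl
      simp at this; omega
    have hgf : l[f] = d := by
      rcases hpre with ⟨tl, htl⟩
      have h0 : l[f]? = some d := by
        have h1 : (l.drop f)[0]? = some d := by rw [← htl]; rfl
        simpa [List.getElem?_drop] using h1
      obtain ⟨_, hg⟩ := List.getElem?_eq_some_iff.mp h0
      exact hg
    have hfgt : u.length < f := by
      rcases lt_trichotomy f u.length with h | h | h
      · exfalso
        apply hu
        have heq : l[f] = u[f]'h := List.getElem_append_left h
        rw [heq] at hgf
        exact hgf ▸ List.getElem_mem h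
      · exfalso
        apply hdc
        rw [← hgf]
        simp only [hl]
        rw [List.getElem_append_right (by omega)]
        simp [h]
      · exact h
    omega
  · left
    rw [PySem.Chars.find_eq_neg_one_iff, singleton_infix_iff_mem]; exact hmem

-- a plain recursive model of str.split with a one-char separator
def pvSp (c : Char) : List Char → List (List Char)
  | [] => [[]]
  | d :: rest => if d = c then [] :: pvSp c rest else (pvSp c rest).modifyHead (d :: ·)

lemma pvSp_go (c : Char) : ∀ (l : List Char) (fuel : Nat) (cur : List Char) (acc : List (List Char)),
    l.length ≤ fuel →
    PySem.Chars.splitOn.go [c] fuel l cur acc = acc.reverse ++ (pvSp c l).modifyHead (cur.reverse ++ ·) := by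
  intro l
  induction l with
  | nil =>
    intro fuel cur acc _
    cases fuel <;> simp [PySem.Chars.splitOn.go, pvSp]
  | cons d rest ih =>
    intro fuel cur acc hlen
    cases fuel with
    | zero => simp at hlen
    | succ f =>
      by_cases hd : d = c
      · subst hd
        have hpref : List.isPrefixOf [d] (d :: rest) = true := by simp [List.isPrefixOf]
        simp only [PySem.Chars.splitOn.go, hpref, if_pos, List.length_cons,
          List.length_nil, Nat.zero_add, List.drop_succ_cons, List.drop_zero]
        rw [ih f [] (cur.reverse :: acc) (by simpa using hlen)]
        simp only [pvSp, if_pos]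
        cases pvSp d rest <;> simp
      · have hpref : List.isPrefixOf [c] (d :: rest) = false := by
          simp [List.isPrefixOf, Ne.symm hd]
        simp only [PySem.Chars.splitOn.go, hpref]
        rw [if_neg (by simp), ih f (d :: cur) acc (by simpa using hlen)]
        simp only [pvSp, if_neg hd, List.modifyHead_modifyHead]
        have hfun : (fun x => (d :: cur).reverse ++ x)
            = ((fun x => cur.reverse ++ x) ∘ fun x => d :: x) := by
          funext x
          simp
        rw [hfun]

lemma splitOn_eq_pvSp (c : Char) (l : List Char) :
    PySem.Chars.splitOn l [c] = pvSp c l := by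
  unfold PySem.Chars.splitOn
  rw [pvSp_go c l (l.length + 1) [] [] (by omega)]
  cases pvSp c l <;> simp

lemma pvSp_no_occ {c : Char} {l : List Char} (h : c ∉ l) : pvSp c l = [l] := by
  induction l with
  | nil => rfl
  | cons d rest ih =>
    simp only [List.mem_cons, not_or] at h
    simp [pvSp, Ne.symm, h.1, ih h.2]

lemma pvSp_split {c : Char} {v : List Char} : ∀ {u : List Char}, c ∉ u →
    pvSp c (u ++ c :: v) = u :: pvSp c v := by
  intro u
  induction u with
  | nil => intro _; simp [pvSp]
  | cons d rest ih =>
    intro h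
    simp only [List.mem_cons, not_or] at h
    simp [pvSp, Ne.symm, h.1, ih h.2]

-- A's loop after the opening quote never breaks when c does not occur
lemma pvLoopA_no_occ (l : List Char) (c : Char) :
    ∀ (k s e : Int), s ≠ -1 → c ∉ l →
      pvLoopA (PySem.List.enumerate l k) s e (some c) = (s, e, some c) := by
  induction l with
  | nil => intro k s e _ _; simp [PySem.List.enumerate_nil, pvLoopA]
  | cons c' rest ih =>
    intro k s e hs hc
    rw [PySem.List.enumerate_cons]
    simp only [List.mem_cons, not_or] at hc
    by_cases hq : c' = '"' ∨ c' = '\''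
    · simp only [pvLoopA, if_pos hq, if_neg hs]
      have : some c' ≠ some c := by simpa using (Ne.symm hc.1)
      rw [if_neg this]
      exact ih (k + 1) s e hs hc.2
    · simp only [pvLoopA, if_neg hq]
      exact ih (k + 1) s e hs hc.2

-- A's loop after the opening quote breaks exactly at the first occurrence of c
lemma pvLoopA_first_occ (c : Char) (hq : c = '"' ∨ c = '\'') (v2 : List Char) :
    ∀ (v1 : List Char) (k s e : Int), s ≠ -1 → c ∉ v1 →
      pvLoopA (PySem.List.enumerate (v1 ++ c :: v2) k) s e (some c) = (s, k + v1.length, some c) := by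
  intro v1
  induction v1 with
  | nil =>
    intro k s e hs _
    rw [List.nil_append, PySem.List.enumerate_cons]
    simp [pvLoopA, hq, hs]
  | cons d tl ih =>
    intro k s e hs hc
    simp only [List.mem_cons, not_or] at hc
    rw [List.cons_append, PySem.List.enumerate_cons]
    have step : pvLoopA ((k, d) :: PySem.List.enumerate (tl ++ c :: v2) (k + 1)) s e (some c)
        = pvLoopA (PySem.List.enumerate (tl ++ c :: v2) (k + 1)) s e (some c) := by
      by_cases hq' : d = '"' ∨ d = '\''
      · have hne : some d ≠ some c := by simpa using (Ne.symm hc.1)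
        simp only [pvLoopA, if_pos hq', if_neg hs, if_neg hne]
      · simp only [pvLoopA, if_neg hq']
    rw [step, ih (k + 1) s e hs hc.2]
    simp only [Prod.mk.injEq, List.length_cons]
    refine ⟨trivial, by push_cast; ring, trivial⟩

-- the first occurrence of c in a decomposed list, as a find value
lemma find_first_decomp {c : Char} {u v : List Char} (hu : c ∉ u) :
    PySem.Chars.find (u ++ c :: v) [c] = (u.length : Int) := by
  refine find_singleton_first (n := u.length) ?_ ?_ ?_
  · simp
  · rw [List.getElem_append_right (by omega)]
    simp
  · simpa [List.take_left] using hu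

-- pvSp never returns the empty list
lemma pvSp_length_pos (c : Char) (l : List Char) : 0 < (pvSp c l).length := by
  induction l with
  | nil => simp [pvSp]
  | cons d rest ih =>
    by_cases hd : d = c
    · simp [pvSp, hd]
    · simpa [pvSp, hd] using ih

-- A's loop skips a quote-free prefix unchanged
lemma pvLoopA_skip : ∀ (u : List Char) (rest : List Char) (k : Int),
    (∀ d ∈ u, ¬(d = '"' ∨ d = '\'')) →
    pvLoopA (PySem.List.enumerate (u ++ rest) k) (-1) (-1) none
      = pvLoopA (PySem.List.enumerate rest (k + u.length)) (-1) (-1) none := by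
  intro u
  induction u with
  | nil => intro rest k _; simp
  | cons d tl ih =>
    intro rest k h
    rw [List.cons_append, PySem.List.enumerate_cons]
    have hd : ¬(d = '"' ∨ d = '\'') := h d (by simp)
    simp only [pvLoopA, if_neg hd]
    rw [ih rest (k + 1) (fun x hx => h x (by simp [hx]))]
    congr 2
    simp only [List.length_cons]
    push_cast
    omega

-- the element at which dropWhile stops fails the predicate
lemma dropWhile_cons_head_false {α : Type} {p : α → Bool} {l : List α} {c : α} {v : List α}
    (h : l.dropWhile p = c :: v) : p c = false := by
  induction l with
  | nil => simp [List.dropWhile] at h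
  | cons a tl ih =>
    rw [List.dropWhile_cons] at h
    by_cases hpa : p a
    · rw [if_pos hpa] at h; exact ih h
    · rw [if_neg hpa] at h
      cases h
      simpa using hpa

-- ===== VERDICT (by name: the statement is the Claim_ definition above) =====
theorem extract_js_ts_import_path_py_spec : Claim_equal_extract_js_ts_import_path_py := by
  intro str _
  unfold Spec_extract_js_ts_import_path_py extract_js_ts_import_path_py extract_js_ts_import_path_py_alt
  dsimp only
  set t := PySem.Str.strip str with ht
  set p : Char → Bool := fun d => !(d = '"' || d = '\'') with hp
  have hdec : t.toList = t.toList.takeWhile p ++ t.toList.dropWhile p :=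
    (List.takeWhile_append_dropWhile).symm
  set u := t.toList.takeWhile p with hu
  have hufree : ∀ d ∈ u, ¬(d = '"' ∨ d = '\'') := by
    intro d hd
    have h1 := List.mem_takeWhile_imp hd
    simp only [hp, Bool.not_eq_eq_eq_not, Bool.not_true, Bool.or_eq_false_iff,
      decide_eq_false_iff_not] at h1
    simp [h1.1, h1.2]
  cases hr : t.toList.dropWhile p with
  | nil =>
    -- no quote at all: both return none
    have hlu : t.toList = u := by rw [hdec, hr, List.append_nil]
    have hdq : PySem.Chars.find t.toList ['"'] = -1 := by
      rw [PySem.Chars.find_eq_neg_one_iff, singleton_infix_iff_mem]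
      intro hmem
      exact hufree '"' (by rwa [← hlu]) (Or.inl rfl)
    have hsq : PySem.Chars.find t.toList ['\''] = -1 := by
      rw [PySem.Chars.find_eq_neg_one_iff, singleton_infix_iff_mem]
      intro hmem
      exact hufree '\'' (by rwa [← hlu]) (Or.inr rfl)
    have hA : pvLoopA (PySem.List.enumerate t.toList 0) (-1) (-1) none = (-1, -1, none) := by
      have hskip := pvLoopA_skip u [] 0 hufree
      rw [List.append_nil] at hskip
      rw [hlu, hskip, PySem.List.enumerate_nil]
      rfl
    rw [hA]
    simp [PySem.Str.find, hdq, hsq]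
  | cons c v =>
    -- l = u ++ c :: v, c the first quote
    have hlc : t.toList = u ++ c :: v := by rw [hdec, hr]
    have hcq : c = '"' ∨ c = '\'' := by
      have h2 := dropWhile_cons_head_false hr
      simp only [hp, Bool.not_eq_eq_eq_not, Bool.not_false, Bool.or_eq_true_iff,
        decide_eq_true_eq] at h2
      exact h2
    have hcu : c ∉ u := fun h => hufree c h hcq
    -- A's loop reaches the opening quote
    have hA1 : pvLoopA (PySem.List.enumerate t.toList 0) (-1) (-1) none
        = pvLoopA (PySem.List.enumerate v ((u.length : Int) + 1)) (u.length : Int) (-1) (some c) := by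
      rw [hlc, pvLoopA_skip u (c :: v) 0 hufree, PySem.List.enumerate_cons]
      simp [pvLoopA, hcq]
    -- B picks exactly c as the quote character
    have hfc : PySem.Chars.find t.toList [c] = (u.length : Int) := by
      rw [hlc]; exact find_first_decomp hcu
    have hother : ∀ d : Char, d ∉ u → d ≠ c →
        PySem.Chars.find t.toList [d] = -1 ∨ (u.length : Int) < PySem.Chars.find t.toList [d] := by
      intro d hdu hdc
      rw [hlc]; exact find_singleton_other hdu hdc
    set dq := PySem.Str.find t "\"" with hdqdef
    set sq := PySem.Str.find t "'" with hsqdef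
    have hdq' : dq = PySem.Chars.find t.toList ['"'] := by rw [hdqdef]; rfl
    have hsq' : sq = PySem.Chars.find t.toList ['\''] := by rw [hsqdef]; rfl
    have hsel : (¬(dq = -1 ∧ sq = -1)) ∧
        ((if sq = -1 ∨ (dq ≠ -1 ∧ dq < sq) then '"' else '\'') = c) := by
      rcases hcq with h | h
      · subst h
        have hdqv : dq = (u.length : Int) := by rw [hdq']; exact hfc
        have hs := hother '\'' (fun hm => hufree _ hm (Or.inr rfl)) (by decide)
        rw [← hsq'] at hs
        refine ⟨fun hcon => by omega, ?_⟩
        rcases hs with h2 | h2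
        · rw [if_pos (Or.inl h2)]
        · rw [if_pos (Or.inr ⟨by omega, by omega⟩)]
      · subst h
        have hsqv : sq = (u.length : Int) := by rw [hsq']; exact hfc
        have hd := hother '"' (fun hm => hufree _ hm (Or.inl rfl)) (by decide)
        rw [← hdq'] at hd
        refine ⟨fun hcon => by omega, ?_⟩
        have hcond : ¬(sq = -1 ∨ (dq ≠ -1 ∧ dq < sq)) := by
          rintro (h1 | ⟨hne, hlt⟩)
          · omega
          · rcases hd with h2 | h2
            · exact hne h2
            · omega
        rw [if_neg hcond]
    have hparts : PySem.Chars.splitOn t.toList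
        [if sq = -1 ∨ (dq ≠ -1 ∧ dq < sq) then '"' else '\''] = u :: pvSp c v := by
      rw [hsel.2, splitOn_eq_pvSp, hlc, pvSp_split hcu]
    rw [hA1, if_neg hsel.1, hparts]
    -- split at the (possible) closing quote
    cases hw : v.dropWhile (fun d => !(d = c)) with
    | nil =>
      -- no closing quote: both none
      have hcv : c ∉ v := by
        intro hm
        have := List.dropWhile_eq_nil_iff.mp hw c hm
        simp at this
      rw [pvLoopA_no_occ v c ((u.length : Int) + 1) (u.length : Int) (-1) (by omega) hcv,
        pvSp_no_occ hcv, if_neg (fun h => h.2 rfl), if_neg (by simp)]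
    | cons c' v2 =>
      have hc' : c' = c := by
        have h2 := dropWhile_cons_head_false hw
        simpa using h2
      rw [hc'] at hw
      set v1 := v.takeWhile (fun d => !(d = c)) with hv1
      have hvdec : v = v1 ++ c :: v2 := by
        conv_lhs => rw [← List.takeWhile_append_dropWhile (p := fun d => !(d = c)) (l := v)]
        rw [hw, hv1]
      have hcv1 : c ∉ v1 := fun hm => by simpa using List.mem_takeWhile_imp hm
      rw [hvdec, pvLoopA_first_occ c hcq v2 v1 ((u.length : Int) + 1) (u.length : Int) (-1)
        (by omega) hcv1, pvSp_split hcv1]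
      rw [if_pos (show ((u.length : Int), (u.length : Int) + 1 + (v1.length : Int), some c).1 ≠ -1
            ∧ ((u.length : Int), (u.length : Int) + 1 + (v1.length : Int), some c).2.1 ≠ -1
          from ⟨by show (u.length : Int) ≠ -1; omega,
                by show (u.length : Int) + 1 + (v1.length : Int) ≠ -1; omega⟩),
        if_pos (show 3 ≤ (u :: v1 :: pvSp c v2).length by
          have := pvSp_length_pos c v2
          simp only [List.length_cons]
          omega)]
      -- both return the text between the quotes
      refine congrArg some (String.toList_inj.mp ?_)
      simp only [PySem.Str.slice, String.toList_ofList, PySem.Chars.slice_eq_listSlice,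
        List.getD_cons_succ, List.getD_cons_zero]
      rw [show ((u.length : Int) + 1) = ((u.length + 1 : Nat) : Int) by push_cast; ring,
        PySem.List.slice_natCast_add, hlc, hvdec,
        show u ++ c :: (v1 ++ c :: v2) = (u ++ [c]) ++ (v1 ++ c :: v2) by simp,
        show u.length + 1 = (u ++ [c]).length by simp,
        List.drop_left, List.take_left]
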